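-- pv_equiv track=rewrite | github.com/megar0829/algorithm | 백준/Gold/12919. A와 B 2/A와 B 2.py | bfs
-- ===== SOURCE A (Python) =====
-- from collections import deque
--
-- def bfs(s, t):
--     que = deque()
--     que.append(t)
--     while que:
--         word = que.popleft()
--         if word == s:
--             return True
--         if len(word) > 1:
--             for k in range(2):
--                 if k == 0:
--                     if word[-1] == 'A':
--                         text = word[:-1]
--                         que.append(text)
--                 else:
--                     if word[0] == 'B':
--                         text = word[::-1]
--                         text = text[:-1]
--                         que.append(text)
--     return False
-- ===== SOURCE B (Python) =====
-- def bfs(s, t):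
--     def go(word):
--         if word == s:
--             return True
--         if len(word) > 1:
--             if word[-1] == 'A' and go(word[:-1]):
--                 return True
--             if word[0] == 'B' and go(word[::-1][:-1]):
--                 return True
--         return False
--     return go(t)
-- ===== Notes on version B (the rewrite author's own statement) =====
-- stated objective: simpler
-- what changed: Replaced the explicit FIFO-deque breadth-first loop with a short recursive depth-first search of the same reduction tree (no queue, no collections import).
import Mathlib
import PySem

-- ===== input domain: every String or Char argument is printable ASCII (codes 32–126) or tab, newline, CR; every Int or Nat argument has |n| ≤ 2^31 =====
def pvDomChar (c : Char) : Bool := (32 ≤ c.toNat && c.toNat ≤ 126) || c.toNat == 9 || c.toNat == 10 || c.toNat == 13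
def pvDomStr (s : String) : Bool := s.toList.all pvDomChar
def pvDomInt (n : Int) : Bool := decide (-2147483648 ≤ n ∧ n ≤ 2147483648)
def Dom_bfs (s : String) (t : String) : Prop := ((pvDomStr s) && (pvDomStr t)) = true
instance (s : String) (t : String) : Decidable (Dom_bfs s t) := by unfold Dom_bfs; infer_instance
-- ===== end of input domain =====

-- B replaces A's explicit FIFO-deque breadth-first loop by a short recursive depth-first
-- search of the same reduction tree (objective: simpler).

-- ===== PORT A =====
-- queue measure used only for termination of the loop
def pvWt (que : List (List Char)) : Nat := (que.map (fun w => 3 ^ w.length)).sum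

theorem pvWt_cons (w : List Char) (rest : List (List Char)) :
    pvWt (w :: rest) = 3 ^ w.length + pvWt rest := by simp [pvWt]

theorem pvWt_append (a b : List (List Char)) : pvWt (a ++ b) = pvWt a + pvWt b := by
  simp [pvWt]

-- the while-loop of A: que.popleft() is the head, que.append adds at the right;
-- word[:-1] = dropLast and word[::-1][:-1] = reverse.dropLast (exact for nonempty word)
def bfsLoop (s : List Char) (que : List (List Char)) : Bool :=
  match que with
  | [] => false
  | word :: rest =>
    if word = s then true
    else
      if h : 1 < word.length then
        bfsLoop s
          ((if PySem.List.pyGet? word (-1) = some 'A' then rest ++ [word.dropLast] else rest)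
            ++ (if PySem.List.pyGet? word 0 = some 'B' then [word.reverse.dropLast] else []))
      else bfsLoop s rest
termination_by pvWt que
decreasing_by
  · have h3 : (3:Nat) ^ word.length = 3 ^ (word.length - 1) * 3 := by
      rw [← pow_succ]; congr 1; omega
    have hp : 0 < (3:Nat) ^ (word.length - 1) := Nat.pow_pos (by omega)
    rw [pvWt_append, pvWt_cons]
    split_ifs <;>
      simp [pvWt, List.length_dropLast] <;> omega
  · rw [pvWt_cons]
    have hp : 0 < (3:Nat) ^ word.length := Nat.pow_pos (by omega)
    omega

def bfs (s : String) (t : String) : Bool := bfsLoop s.toList [t.toList]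

-- ===== PORT B =====
-- recursive depth-first search of the reduction tree
def bfsGo (s : List Char) (word : List Char) : Bool :=
  if word = s then true
  else
    if h : 1 < word.length then
      (decide (PySem.List.pyGet? word (-1) = some 'A') && bfsGo s word.dropLast)
        || (decide (PySem.List.pyGet? word 0 = some 'B') && bfsGo s word.reverse.dropLast)
    else false
termination_by word.length
decreasing_by
  · simp [List.length_dropLast]; omega
  · simp; omega

def bfs_alt (s : String) (t : String) : Bool := bfsGo s.toList t.toList

-- ===== PRECONDITION & SPEC =====
def Spec_bfs (s : String) (t : String) (out : Bool) : Prop := out = bfs_alt s t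
instance (s : String) (t : String) (out : Bool) : Decidable (Spec_bfs s t out) := by unfold Spec_bfs; infer_instance

-- ===== CLAIM (what is proved, stated in full; the proofs are below) =====
def Claim_equal_bfs : Prop := ∀ (s : String) (t : String), Dom_bfs s t → Spec_bfs s t (bfs s t)

-- ===== LEMMAS AND PROOFS =====

-- A's breadth-first loop answers: does SOME queue element reduce to s?
theorem bfsLoop_eq_any (s : List Char) (que : List (List Char)) :
    bfsLoop s que = que.any (bfsGo s) := by
  fun_induction bfsLoop s que with
  | case1 => simp
  | case2 rest =>
      rw [List.any_cons, bfsGo]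
      simp
  | case3 word rest hne hlen ih =>
      simp only [List.unattach_reverse, List.unattach_attach, dite_eq_ite] at ih
      rw [ih, List.any_cons]
      rw [show bfsGo s word
            = ((decide (PySem.List.pyGet? word (-1) = some 'A') && bfsGo s word.dropLast)
               || (decide (PySem.List.pyGet? word 0 = some 'B') && bfsGo s word.reverse.dropLast)) by
        rw [bfsGo]; simp [hne, hlen]]
      by_cases hA : PySem.List.pyGet? word (-1) = some 'A' <;>
        by_cases hB : PySem.List.pyGet? word 0 = some 'B' <;>
          simp [hA, hB, List.any_append, Bool.or_comm, Bool.or_left_comm, Bool.or_assoc]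
  | case4 word rest hne hlen ih =>
      simp only [List.unattach_reverse, List.unattach_attach, dite_eq_ite] at ih
      rw [ih]
      have hg : bfsGo s word = false := by rw [bfsGo]; simp [hne, hlen]
      simp [List.any_cons, hg]

-- ===== VERDICT (by name: the statement is the Claim_ definition above) =====
theorem bfs_spec : Claim_equal_bfs := by
  intro s t _
  show bfs s t = bfs_alt s t
  unfold bfs bfs_alt
  rw [bfsLoop_eq_any]
  simp
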